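-- pv_equiv track=rewrite | github.com/robertcprice/nCPU | tools/runners/run_neural_rtos_v2_heuristics_backup.py | _classify_loop_type
-- ===== SOURCE A (Python) =====
-- def _classify_loop_type(loop_body):
--     """
--     Classify loop type based on instruction patterns.
--
--     Returns:
--         str: 'MEMSET', 'MEMCPY', 'POLLING', 'ARITHMETIC', or 'UNKNOWN'
--     """
--     # Count operations in loop body
--     stores = sum(1 for _, inst, dec in loop_body if dec and len(dec) >= 7 and dec[5])  # is_store
--     loads = sum(1 for _, inst, dec in loop_body if dec and len(dec) >= 7 and dec[4])  # is_load
--     adds = sum(1 for _, inst, dec in loop_body if dec and len(dec) >= 7 and dec[3] == 0)  # ADD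
--     subs = sum(1 for _, inst, dec in loop_body if dec and len(dec) >= 7 and dec[3] == 1)  # SUB
--     cmps = sum(1 for _, inst, dec in loop_body if dec and len(dec) >= 7 and dec[3] == 11)  # COMPARE
--     branches = sum(1 for _, inst, dec in loop_body if dec and len(dec) >= 7 and dec[3] == 10)  # BRANCH
--
--     # MEMSET: Any loop with STORE + COMPARE + BRANCH
--     # (ADD might be outside loop or via post-index addressing)
--     if stores > 0 and cmps > 0 and branches > 0:
--         return 'MEMSET'
--
--     # MEMCPY: LOAD + STORE + COMPARE + BRANCH
--     if loads > 0 and stores > 0 and cmps > 0 and branches > 0: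
--         return 'MEMCPY'
--
--     # POLLING: LOAD + COMPARE (no STORE operations)
--     if loads > 0 and cmps > 0 and stores == 0:
--         return 'POLLING'
--
--     # ARITHMETIC: ADD/SUB + COMPARE (no memory operations)
--     if (adds > 0 or subs > 0) and cmps > 0 and loads == 0 and stores == 0:
--         return 'ARITHMETIC'
--
--     return 'UNKNOWN'
-- ===== SOURCE B (Python) =====
-- def _classify_loop_type(loop_body):
--     """Classify loop type: single pass with boolean flags (dead MEMCPY branch removed)."""
--     has_store = has_load = has_add = has_sub = has_cmp = has_branch = False
--     for _, _inst, dec in loop_body: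
--         if dec and len(dec) >= 7:
--             if dec[5]:
--                 has_store = True
--             if dec[4]:
--                 has_load = True
--             op = dec[3]
--             if op == 0:
--                 has_add = True
--             elif op == 1:
--                 has_sub = True
--             elif op == 11:
--                 has_cmp = True
--             elif op == 10:
--                 has_branch = True
--     if has_store and has_cmp and has_branch:
--         return 'MEMSET'
--     if has_load and has_cmp and not has_store:
--         return 'POLLING'
--     if (has_add or has_sub) and has_cmp and not has_load and not has_store:
--         return 'ARITHMETIC'
--     return 'UNKNOWN'
-- ===== Notes on version B (the rewrite author's own statement) =====
-- stated objective: simpler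
-- what changed: Six separate counting scans become one pass maintaining six boolean flags, and the unreachable MEMCPY branch (its condition is subsumed by the MEMSET branch above it) is removed.
import Mathlib
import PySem

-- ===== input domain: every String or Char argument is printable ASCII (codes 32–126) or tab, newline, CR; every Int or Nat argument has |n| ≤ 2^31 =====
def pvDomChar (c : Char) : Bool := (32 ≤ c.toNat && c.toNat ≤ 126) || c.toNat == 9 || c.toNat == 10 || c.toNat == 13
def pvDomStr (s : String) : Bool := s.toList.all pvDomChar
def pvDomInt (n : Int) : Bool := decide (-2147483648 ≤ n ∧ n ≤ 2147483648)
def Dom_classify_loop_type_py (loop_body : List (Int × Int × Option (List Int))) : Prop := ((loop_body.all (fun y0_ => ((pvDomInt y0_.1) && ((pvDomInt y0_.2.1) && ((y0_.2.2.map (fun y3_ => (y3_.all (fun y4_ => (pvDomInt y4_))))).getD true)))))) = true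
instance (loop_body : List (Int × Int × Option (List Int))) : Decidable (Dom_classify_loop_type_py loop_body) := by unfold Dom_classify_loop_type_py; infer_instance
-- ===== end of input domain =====

-- B replaces A's six separate counting scans by one pass over loop_body maintaining six
-- boolean flags, and drops A's unreachable MEMCPY branch (subsumed by the MEMSET test).

-- ===== PORT A =====
-- 'dec and len(dec) >= 7 and <test>': dec truthy (non-None, non-empty) and length ≥ 7.
-- dec[5]/dec[4]/dec[3] are in range under the length guard, so List.getD is exact here.
def pvCondStore (t : Int × Int × Option (List Int)) : Bool :=
  match t.2.2 with
  | none => false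
  | some l => !l.isEmpty && decide (7 ≤ l.length) && decide (l.getD 5 0 ≠ 0)

def pvCondLoad (t : Int × Int × Option (List Int)) : Bool :=
  match t.2.2 with
  | none => false
  | some l => !l.isEmpty && decide (7 ≤ l.length) && decide (l.getD 4 0 ≠ 0)

def pvCondOp (k : Int) (t : Int × Int × Option (List Int)) : Bool :=
  match t.2.2 with
  | none => false
  | some l => !l.isEmpty && decide (7 ≤ l.length) && decide (l.getD 3 0 = k)

-- sum(1 for … if cond) as a left fold accumulating an int
def pvSum1 (p : Int × Int × Option (List Int) → Bool)
    (xs : List (Int × Int × Option (List Int))) : Int :=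
  xs.foldl (fun acc t => if p t then acc + 1 else acc) 0

def classify_loop_type_py (loop_body : List (Int × Int × Option (List Int))) : String :=
  let stores := pvSum1 pvCondStore loop_body
  let loads := pvSum1 pvCondLoad loop_body
  let adds := pvSum1 (pvCondOp 0) loop_body
  let subs := pvSum1 (pvCondOp 1) loop_body
  let cmps := pvSum1 (pvCondOp 11) loop_body
  let branches := pvSum1 (pvCondOp 10) loop_body
  if 0 < stores ∧ 0 < cmps ∧ 0 < branches then "MEMSET"
  else if 0 < loads ∧ 0 < stores ∧ 0 < cmps ∧ 0 < branches then "MEMCPY"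
  else if 0 < loads ∧ 0 < cmps ∧ stores = 0 then "POLLING"
  else if (0 < adds ∨ 0 < subs) ∧ 0 < cmps ∧ loads = 0 ∧ stores = 0 then "ARITHMETIC"
  else "UNKNOWN"

-- ===== PORT B =====
-- flags: (has_store, has_load, has_add, has_sub, has_cmp, has_branch)
def pvStep (fl : Bool × Bool × Bool × Bool × Bool × Bool)
    (t : Int × Int × Option (List Int)) : Bool × Bool × Bool × Bool × Bool × Bool :=
  match t.2.2 with
  | none => fl
  | some l =>
    if !l.isEmpty && decide (7 ≤ l.length) then
      let (s, ld, a, b, c, br) := fl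
      let s := if l.getD 5 0 ≠ 0 then true else s
      let ld := if l.getD 4 0 ≠ 0 then true else ld
      let op := l.getD 3 0
      if op = 0 then (s, ld, true, b, c, br)
      else if op = 1 then (s, ld, a, true, c, br)
      else if op = 11 then (s, ld, a, b, true, br)
      else if op = 10 then (s, ld, a, b, c, true)
      else (s, ld, a, b, c, br)
    else fl

def classify_loop_type_py_alt (loop_body : List (Int × Int × Option (List Int))) : String :=
  match loop_body.foldl pvStep (false, false, false, false, false, false) with
  | (s, ld, a, b, c, br) =>
    if s && c && br then "MEMSET"
    else if ld && c && !s then "POLLING"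
    else if (a || b) && c && !ld && !s then "ARITHMETIC"
    else "UNKNOWN"

-- ===== PRECONDITION & SPEC =====
def Spec_classify_loop_type_py (loop_body : List (Int × Int × Option (List Int))) (out : String) : Prop := out = classify_loop_type_py_alt loop_body
instance (loop_body : List (Int × Int × Option (List Int))) (out : String) : Decidable (Spec_classify_loop_type_py loop_body out) := by unfold Spec_classify_loop_type_py; infer_instance

-- ===== CLAIM (what is proved, stated in full; the proofs are below) =====
def Claim_equal_classify_loop_type_py : Prop := ∀ (loop_body : List (Int × Int × Option (List Int))), Dom_classify_loop_type_py loop_body → Spec_classify_loop_type_py loop_body (classify_loop_type_py loop_body)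

-- ===== LEMMAS AND PROOFS =====

theorem pvSum1_eq_countP (p : Int × Int × Option (List Int) → Bool)
    (xs : List (Int × Int × Option (List Int))) : pvSum1 p xs = (xs.countP p : Int) := by
  have h : ∀ (xs : List (Int × Int × Option (List Int))) (acc : Int),
      xs.foldl (fun acc t => if p t then acc + 1 else acc) acc = acc + (xs.countP p : Int) := by
    intro xs
    induction xs with
    | nil => intro acc; simp [List.countP]
    | cons x xs ih =>
      intro acc
      by_cases hx : p x = true <;>
        simp [List.foldl, hx, ih]; ring
  simpa using h xs 0

theorem pvSum1_pos (p : Int × Int × Option (List Int) → Bool)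
    (xs : List (Int × Int × Option (List Int))) : (0 < pvSum1 p xs) ↔ xs.any p = true := by
  rw [pvSum1_eq_countP]
  constructor
  · intro h
    have : 0 < xs.countP p := by exact_mod_cast h
    rw [List.countP_pos_iff] at this
    obtain ⟨a, ha, hp⟩ := this
    exact List.any_eq_true.mpr ⟨a, ha, hp⟩
  · intro h
    obtain ⟨a, ha, hp⟩ := List.any_eq_true.mp h
    have : 0 < xs.countP p := List.countP_pos_iff.mpr ⟨a, ha, hp⟩
    exact_mod_cast this

theorem pvSum1_zero (p : Int × Int × Option (List Int) → Bool)
    (xs : List (Int × Int × Option (List Int))) : (pvSum1 p xs = 0) ↔ xs.any p = false := by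
  have h := pvSum1_pos p xs
  have hnn : 0 ≤ pvSum1 p xs := by
    rw [pvSum1_eq_countP]; exact_mod_cast Nat.zero_le _
  constructor
  · intro h0
    cases hx : xs.any p with
    | false => rfl
    | true => exfalso; rw [h0] at h; exact absurd (h.mpr hx) (lt_irrefl 0)
  · intro hx
    by_contra hne
    have : 0 < pvSum1 p xs := lt_of_le_of_ne hnn (Ne.symm hne)
    rw [h, hx] at this; cases this

theorem pvStep_eq (fl : Bool × Bool × Bool × Bool × Bool × Bool)
    (t : Int × Int × Option (List Int)) :
    pvStep fl t = (fl.1 || pvCondStore t, fl.2.1 || pvCondLoad t,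
      fl.2.2.1 || pvCondOp 0 t, fl.2.2.2.1 || pvCondOp 1 t,
      fl.2.2.2.2.1 || pvCondOp 11 t, fl.2.2.2.2.2 || pvCondOp 10 t) := by
  obtain ⟨x, y, dec⟩ := t
  obtain ⟨s, ld, a, b, c, br⟩ := fl
  cases dec with
  | none => simp [pvStep, pvCondStore, pvCondLoad, pvCondOp]
  | some l =>
    by_cases hg : (!l.isEmpty && decide (7 ≤ l.length)) = true
    · simp only [pvStep, pvCondStore, pvCondLoad, pvCondOp, hg, Bool.true_and, if_true]
      by_cases h5 : l.getD 5 0 ≠ 0 <;> by_cases h4 : l.getD 4 0 ≠ 0 <;>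
        rcases heq : l.getD 3 0 with n | n <;>
          split_ifs <;> simp_all
    · have hg' : (!l.isEmpty && decide (7 ≤ l.length)) = false := by
        cases h : (!l.isEmpty && decide (7 ≤ l.length)) <;> simp_all
      simp [pvStep, pvCondStore, pvCondLoad, pvCondOp, hg']

theorem pvFold_eq (xs : List (Int × Int × Option (List Int)))
    (fl : Bool × Bool × Bool × Bool × Bool × Bool) :
    xs.foldl pvStep fl = (fl.1 || xs.any pvCondStore, fl.2.1 || xs.any pvCondLoad,
      fl.2.2.1 || xs.any (pvCondOp 0), fl.2.2.2.1 || xs.any (pvCondOp 1),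
      fl.2.2.2.2.1 || xs.any (pvCondOp 11), fl.2.2.2.2.2 || xs.any (pvCondOp 10)) := by
  induction xs generalizing fl with
  | nil => simp
  | cons x xs ih =>
    simp only [List.foldl_cons, List.any_cons, ih, pvStep_eq, Bool.or_assoc]

-- ===== VERDICT (by name: the statement is the Claim_ definition above) =====
theorem classify_loop_type_py_spec : Claim_equal_classify_loop_type_py := by
  intro xs _
  unfold Spec_classify_loop_type_py classify_loop_type_py classify_loop_type_py_alt
  rw [pvFold_eq]
  simp only [Bool.false_or, pvSum1_pos, pvSum1_zero]
  generalize xs.any pvCondStore = s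
  generalize xs.any pvCondLoad = ld
  generalize xs.any (pvCondOp 0) = a
  generalize xs.any (pvCondOp 1) = b
  generalize xs.any (pvCondOp 11) = c
  generalize xs.any (pvCondOp 10) = br
  cases s <;> cases ld <;> cases a <;> cases b <;> cases c <;> cases br <;> decide
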